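-- pv_equiv track=rewrite | github.com/warithr621/Comp-Programming | USACO_and_Guide/2016-2017/January/secret_cow_code.py | char_finder
-- ===== SOURCE A (Python) =====
-- def char_finder(s, n):
--     if n < len(s):
--         return s[n]
--     L = len(s)
--     while(L * 2 <= n):
--         L *= 2
--     if L == n:
--         return char_finder(s, L-1)
--
--     return char_finder(s, n - L - 1)
-- ===== SOURCE B (Python) =====
-- def char_finder(s, n):
--     L0 = len(s)
--     while n >= L0:
--         L = L0 << ((n // L0).bit_length() - 1)
--         n = L - 1 if L == n else n - L - 1
--     return s[n]
-- ===== Notes on version B (the rewrite author's own statement) =====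
-- stated objective: alternative
-- what changed: Replaced the recursion that rediscovers each level's block length by repeated doubling with an iterative descent that computes each block length in closed form as len(s) << ((n // len(s)).bit_length() - 1).
import Mathlib
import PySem

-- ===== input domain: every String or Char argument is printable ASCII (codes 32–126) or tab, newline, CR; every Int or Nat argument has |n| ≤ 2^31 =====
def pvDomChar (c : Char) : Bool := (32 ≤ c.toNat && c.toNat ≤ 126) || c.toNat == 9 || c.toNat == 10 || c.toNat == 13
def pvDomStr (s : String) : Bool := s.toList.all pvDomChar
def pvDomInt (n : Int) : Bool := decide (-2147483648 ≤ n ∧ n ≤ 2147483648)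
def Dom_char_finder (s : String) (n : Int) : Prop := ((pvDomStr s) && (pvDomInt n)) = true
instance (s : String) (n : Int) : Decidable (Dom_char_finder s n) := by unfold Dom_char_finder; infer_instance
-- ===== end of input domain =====

-- B replaces A's recursion (whose every call rediscovers the block length by a doubling loop)
-- with an iterative descent computing each block length in closed form from bit_length;
-- same values (objective: alternative, no speed claim).
-- All loops/recursions are written with a fuel parameter as a pure totality guard; the fuel
-- chosen is provably sufficient (see the *_step lemmas), so it never alters the computation.

-- ===== PORT A =====
-- A's inner `while L*2 <= n: L *= 2`; the `0 < L` conjunct is a totality guard only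
-- (Python never leaves that loop when L = 0; reachable only for s = "", excluded by Pre_).
def pyGrowF : Nat → Int → Int → Int
  | 0, L, _ => L
  | f + 1, L, n => if 0 < L ∧ 2 * L ≤ n then pyGrowF f (2 * L) n else L

def pyGrow (L n : Int) : Int := pyGrowF ((n - L).toNat + 1) L n

-- A's recursive char_finder, fuel-guarded (fuel 0 is unreachable for the fuel chosen below)
def charFinderF : Nat → String → Int → String
  | 0, _, _ => ""
  | f + 1, s, n =>
    if n < PySem.Str.len s then
      match PySem.Str.pyGet? s n with      -- s[n]; `none` = IndexError, excluded by Pre_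
      | some c => String.ofList [c]
      | none => ""
    else
      let L := pyGrow (PySem.Str.len s) n
      if L = n then charFinderF f s (L - 1)
      else charFinderF f s (n - L - 1)

def char_finder (s : String) (n : Int) : String := charFinderF ((n + 1).toNat + 1) s n

-- ===== PORT B =====
-- the closed-form block length  L0 << ((n // L0).bit_length() - 1)  from Source B
def blockLen (L0 n : Int) : Int :=
  L0 <<< (PySem.Int.bitLength (PySem.Int.floordiv n L0) - 1)

-- Source B's while-loop, fuel-guarded; the `0 < L0` conjunct is a totality guard only (Python
-- raises ZeroDivisionError there; reachable only for s = "", excluded by Pre_).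
def altGoF : Nat → Int → Int → Int
  | 0, _, n => n
  | f + 1, L0, n =>
    if L0 ≤ n ∧ 0 < L0 then
      let L := blockLen L0 n
      altGoF f L0 (if L = n then L - 1 else n - L - 1)
    else n

def altGo (L0 n : Int) : Int := altGoF ((n + 1).toNat + 1) L0 n

def char_finder_alt (s : String) (n : Int) : String :=
  match PySem.Str.pyGet? s (altGo (PySem.Str.len s) n) with   -- s[n] after the descent
  | some c => String.ofList [c]
  | none => ""

-- ===== PRECONDITION & SPEC =====
-- Pre_ excludes exactly the inputs on which Python A does not return normally: s = ""
-- (infinite loop for n ≥ 0, IndexError for n < 0) and n < -len(s) (IndexError).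
def Pre_char_finder (s : String) (n : Int) : Prop :=
  s ≠ "" ∧ -(PySem.Str.len s) ≤ n
instance (s : String) (n : Int) : Decidable (Pre_char_finder s n) := by
  unfold Pre_char_finder; infer_instance

def pvWitness_char_finder : String × Int := ("ab", 5)

def Spec_char_finder (s : String) (n : Int) (out : String) : Prop := out = char_finder_alt s n
instance (s : String) (n : Int) (out : String) : Decidable (Spec_char_finder s n out) := by unfold Spec_char_finder; infer_instance

-- ===== CLAIM (what is proved, stated in full; the proofs are below) =====
def Claim_equal_char_finder : Prop := ∀ (s : String) (n : Int), Dom_char_finder s n → Pre_char_finder s n → Spec_char_finder s n (char_finder s n)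

-- ===== LEMMAS AND PROOFS =====

-- the fuel of A's inner loop is irrelevant once it exceeds (n - L).toNat
theorem pyGrowF_irrel (f : Nat) : ∀ (g : Nat) (L n : Int),
    (n - L).toNat < f → (n - L).toNat < g → pyGrowF f L n = pyGrowF g L n := by
  induction f with
  | zero => intro g L n hf; omega
  | succ f ih =>
    intro g L n hf hg
    cases g with
    | zero => omega
    | succ g =>
      simp only [pyGrowF]
      split
      · rename_i h
        exact ih g (2 * L) n (by omega) (by omega)
      · rfl

-- A's inner loop really unfolds one step at a time
theorem pyGrow_step (L n : Int) :
    pyGrow L n = if 0 < L ∧ 2 * L ≤ n then pyGrow (2 * L) n else L := by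
  show pyGrowF ((n - L).toNat + 1) L n = _
  simp only [pyGrowF]
  split
  · rename_i h
    exact pyGrowF_irrel _ _ (2 * L) n (by omega) (by omega)
  · rfl

-- the doubling loop's result stays ≥ its start
theorem pyGrow_ge (L n : Int) : L ≤ pyGrow L n := by
  have H : ∀ (k : Nat) (L n : Int), (n - L).toNat = k → L ≤ pyGrow L n := by
    intro k
    induction k using Nat.strong_induction_on with
    | _ k ih =>
      intro L n hk
      rw [pyGrow_step]
      split
      · rename_i h
        have := ih (n - 2 * L).toNat (by omega) (2 * L) n rfl
        omega
      · exact le_refl L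
  exact H _ L n rfl

-- for empty s the A port returns "" whatever the index
theorem char_finder_empty (s : String) (hs : PySem.Str.len s = 0) (m : Int) :
    char_finder s m = "" := by
  have hnil : s.toList = [] := by
    have := PySem.Str.len_eq s
    exact List.eq_nil_of_length_eq_zero (by omega)
  have hget : ∀ i : Int, PySem.Str.pyGet? s i = none := by
    intro i
    rw [PySem.Str.pyGet?_eq, hnil, PySem.Chars.pyGet?_eq_listPyGet?,
      PySem.List.pyGet?_eq_none_iff]
    simp [PySem.Raise.InRange]
  have H : ∀ (f : Nat) (i : Int), charFinderF f s i = "" := by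
    intro f
    induction f with
    | zero => intro i; rfl
    | succ f ih =>
      intro i
      simp only [charFinderF]
      split
      · rw [hget]
      · split
        · exact ih _
        · exact ih _
  exact H _ m

-- the fuel of A's recursion is irrelevant once it exceeds (n + 1).toNat
theorem charFinderF_irrel (f : Nat) : ∀ (g : Nat) (s : String) (n : Int),
    (n + 1).toNat < f → (n + 1).toNat < g → charFinderF f s n = charFinderF g s n := by
  induction f with
  | zero => intro g s n hf; omega
  | succ f ih =>
    intro g s n hf hg
    cases g with
    | zero => omega
    | succ g =>
      simp only [charFinderF]
      split
      · rfl
      · rename_i h1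
        have hlen := PySem.Str.len_eq s
        have hge := pyGrow_ge (PySem.Str.len s) n
        split
        · rename_i h2
          exact ih g s _ (by omega) (by omega)
        · rename_i h2
          exact ih g s _ (by omega) (by omega)

-- A's recursion really unfolds one step at a time
theorem char_finder_step (s : String) (n : Int) :
    char_finder s n =
      if n < PySem.Str.len s then
        (match PySem.Str.pyGet? s n with
          | some c => String.ofList [c]
          | none => "")
      else
        let L := pyGrow (PySem.Str.len s) n
        if L = n then char_finder s (L - 1) else char_finder s (n - L - 1) := by
  show charFinderF ((n + 1).toNat + 1) s n = _
  simp only [charFinderF]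
  split
  · rfl
  · rename_i h1
    have hlen := PySem.Str.len_eq s
    have hge := pyGrow_ge (PySem.Str.len s) n
    split
    · rename_i h2
      exact charFinderF_irrel _ _ s _ (by omega) (by omega)
    · rename_i h2
      exact charFinderF_irrel _ _ s _ (by omega) (by omega)

-- bounds on the closed-form block length: 1 ≤ blockLen L0 n ≤ n when 0 < L0 ≤ n
theorem blockLen_bounds (L0 n : Int) (h0 : 0 < L0) (hn : L0 ≤ n) :
    1 ≤ blockLen L0 n ∧ blockLen L0 n ≤ n := by
  have hq1 : 1 ≤ PySem.Int.floordiv n L0 :=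
    (PySem.Int.le_floordiv_iff_mul_le h0).2 (by omega)
  set q := PySem.Int.floordiv n L0 with hq
  have hqle : q * L0 ≤ n := (PySem.Int.le_floordiv_iff_mul_le h0).1 (le_refl q)
  have hpow : 2 ^ (PySem.Int.bitLength q - 1) ≤ q.natAbs :=
    PySem.Int.two_pow_bitLength_le q (by omega)
  have hsh : blockLen L0 n = L0 * 2 ^ (PySem.Int.bitLength q - 1) := by
    rw [blockLen, ← hq, Int.shiftLeft_eq]
  have hpow' : (2:Int) ^ (PySem.Int.bitLength q - 1) ≤ q := by
    have := Int.natAbs_of_nonneg (show (0:Int) ≤ q by omega)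
    calc (2:Int) ^ (PySem.Int.bitLength q - 1)
        = ((2 ^ (PySem.Int.bitLength q - 1) : Nat) : Int) := by push_cast; ring
      _ ≤ (q.natAbs : Int) := by exact_mod_cast hpow
      _ = q := this
  have hp1 : (1:Int) ≤ 2 ^ (PySem.Int.bitLength q - 1) := one_le_pow₀ (by omega)
  constructor
  · rw [hsh]; nlinarith
  · rw [hsh]; nlinarith

-- the fuel of B's loop is irrelevant once it exceeds (n + 1).toNat
theorem altGoF_irrel (f : Nat) : ∀ (g : Nat) (L0 n : Int),
    (n + 1).toNat < f → (n + 1).toNat < g → altGoF f L0 n = altGoF g L0 n := by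
  induction f with
  | zero => intro g L0 n hf; omega
  | succ f ih =>
    intro g L0 n hf hg
    cases g with
    | zero => omega
    | succ g =>
      simp only [altGoF]
      split
      · rename_i h
        have hb := blockLen_bounds L0 n h.2 h.1
        split
        · exact ih g L0 _ (by omega) (by omega)
        · exact ih g L0 _ (by omega) (by omega)
      · rfl

-- B's loop really unfolds one step at a time
theorem altGo_step (L0 n : Int) :
    altGo L0 n =
      if L0 ≤ n ∧ 0 < L0 then
        altGo L0 (if blockLen L0 n = n then blockLen L0 n - 1 else n - blockLen L0 n - 1)
      else n := by
  show altGoF ((n + 1).toNat + 1) L0 n = _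
  simp only [altGoF]
  split
  · rename_i h
    have hb := blockLen_bounds L0 n h.2 h.1
    split
    · exact altGoF_irrel _ _ L0 _ (by omega) (by omega)
    · exact altGoF_irrel _ _ L0 _ (by omega) (by omega)
  · rfl

theorem bitLength_pos (q : Int) (h : 1 ≤ q) : 1 ≤ PySem.Int.bitLength q := by
  rcases Nat.eq_zero_or_pos (PySem.Int.bitLength q) with hz | hp
  · exfalso
    have := PySem.Int.lt_two_pow_bitLength q
    rw [hz] at this
    simp at this
    omega
  · omega

-- the matching upper bracket: n is below twice the closed-form block length
theorem blockLen_double (L0 n : Int) (h0 : 0 < L0) (hn : L0 ≤ n) :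
    n < 2 * blockLen L0 n := by
  have hq1 : 1 ≤ PySem.Int.floordiv n L0 :=
    (PySem.Int.le_floordiv_iff_mul_le h0).2 (by omega)
  set q := PySem.Int.floordiv n L0 with hq
  have hsh : blockLen L0 n = L0 * 2 ^ (PySem.Int.bitLength q - 1) := by
    rw [blockLen, ← hq, Int.shiftLeft_eq]
  have hlt : n < (q + 1) * L0 := (PySem.Int.floordiv_lt_iff_lt_mul h0).1 (by omega)
  have habs : q.natAbs < 2 ^ PySem.Int.bitLength q := PySem.Int.lt_two_pow_bitLength q
  have hq2 : q + 1 ≤ ((2 ^ PySem.Int.bitLength q : Nat) : Int) := by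
    have h1 : (q.natAbs : Int) < ((2 ^ PySem.Int.bitLength q : Nat) : Int) := by
      exact_mod_cast habs
    have h2 := Int.natAbs_of_nonneg (show (0:Int) ≤ q by omega)
    omega
  have hbl1 := bitLength_pos q hq1
  have hpowsplit : ((2 ^ PySem.Int.bitLength q : Nat) : Int)
      = 2 * 2 ^ (PySem.Int.bitLength q - 1) := by
    push_cast
    rw [← pow_succ']
    congr 1
    omega
  rw [hsh]
  nlinarith [hq2, hlt, hpowsplit]

-- A's doubling loop reaches any value of the form L·2^j bracketed by F ≤ n < 2F
theorem pyGrow_unique (L n F : Int) (h0 : 0 < L)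
    (hF : ∃ j : Nat, F = L * 2 ^ j) (hFle : F ≤ n) (hFgt : n < 2 * F) :
    pyGrow L n = F := by
  have H : ∀ (k : Nat) (L F : Int), (n - L).toNat = k → 0 < L →
      (∃ j : Nat, F = L * 2 ^ j) → F ≤ n → n < 2 * F → pyGrow L n = F := by
    intro k
    induction k using Nat.strong_induction_on with
    | _ k ih =>
      intro L F hk h0 hF hFle hFgt
      obtain ⟨j, rfl⟩ := hF
      rw [pyGrow_step]
      split
      · rename_i h
        cases j with
        | zero => simp at hFle hFgt ⊢; omega
        | succ j' =>
          have e : L * 2 ^ (j' + 1) = (2 * L) * 2 ^ j' := by ring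
          rw [e]
          exact ih (n - 2 * L).toNat (by omega) (2 * L) ((2 * L) * 2 ^ j') rfl (by omega)
            ⟨j', rfl⟩ (by rw [← e]; exact hFle) (by rw [← e]; exact hFgt)
      · rename_i h
        have h2 : ¬ 2 * L ≤ n := by omega
        cases j with
        | zero => ring
        | succ j' =>
          exfalso
          have hp : (1:Int) ≤ 2 ^ j' := one_le_pow₀ (by omega)
          have e : L * 2 ^ (j' + 1) = 2 * L * 2 ^ j' := by ring
          nlinarith [hFle]
  exact H _ L F rfl h0 hF hFle hFgt

-- B's closed form equals what A's doubling loop computes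
theorem pyGrow_eq_blockLen (L0 n : Int) (h0 : 0 < L0) (hn : L0 ≤ n) :
    pyGrow L0 n = blockLen L0 n := by
  have hb := blockLen_bounds L0 n h0 hn
  refine pyGrow_unique L0 n _ h0 ?_ hb.2 (blockLen_double L0 n h0 hn)
  refine ⟨PySem.Int.bitLength (PySem.Int.floordiv n L0) - 1, ?_⟩
  rw [blockLen, Int.shiftLeft_eq]

-- the final indexing step, shared by both ports
def getChar (s : String) (m : Int) : String :=
  match PySem.Str.pyGet? s m with
  | some c => String.ofList [c]
  | none => ""

theorem char_finder_eq_alt (s : String) (n : Int) :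
    char_finder s n = getChar s (altGo (PySem.Str.len s) n) := by
  have hlen := PySem.Str.len_eq s
  have H : ∀ (k : Nat) (n : Int), (n + 1).toNat = k →
      char_finder s n = getChar s (altGo (PySem.Str.len s) n) := by
    intro k
    induction k using Nat.strong_induction_on with
    | _ k ih =>
      intro n hk
      rw [char_finder_step]
      split
      · rename_i h1
        rw [altGo_step, if_neg (by omega)]
        rfl
      · rename_i h1
        rcases eq_or_lt_of_le (show (0:Int) ≤ PySem.Str.len s by omega) with hz | hpos
        · -- s is empty: both sides are ""
          have hs0 : PySem.Str.len s = 0 := hz.symm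
          have hnil : s.toList = [] := List.eq_nil_of_length_eq_zero (by omega)
          have hget : ∀ m : Int, getChar s m = "" := by
            intro m
            rw [getChar]
            rw [show PySem.Str.pyGet? s m = none from ?_]
            rw [PySem.Str.pyGet?_eq, hnil, PySem.Chars.pyGet?_eq_listPyGet?,
              PySem.List.pyGet?_eq_none_iff]
            simp [PySem.Raise.InRange]
          simp only []
          split
          · rw [char_finder_empty s hs0, hget]
          · rw [char_finder_empty s hs0, hget]
        · -- s nonempty, n ≥ len(s): one step of A matches one step of B's loop
          have hgrow := pyGrow_eq_blockLen (PySem.Str.len s) n hpos (by omega)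
          have hge := pyGrow_ge (PySem.Str.len s) n
          rw [altGo_step,
            if_pos (show PySem.Str.len s ≤ n ∧ 0 < PySem.Str.len s from ⟨by omega, hpos⟩)]
          simp only [← hgrow]
          by_cases h2 : pyGrow (PySem.Str.len s) n = n
          · rw [if_pos h2, if_pos h2]
            exact ih _ (by omega) _ rfl
          · rw [if_neg h2, if_neg h2]
            exact ih _ (by omega) _ rfl
  exact H _ n rfl

-- ===== VERDICT (by name: the statement is the Claim_ definition above) =====
theorem char_finder_spec : Claim_equal_char_finder := by
  intro s n _ _
  unfold Spec_char_finder
  rw [char_finder_eq_alt]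
  rfl
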